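-- pv_equiv track=rewrite | github.com/magicbuka/python_projects | 28_survived/MaximumDiscount.py | MaximumDiscount
-- ===== SOURCE A (Python) =====
-- def MaximumDiscount(N, price):
--     price.sort(reverse=True)
--     discount = 0
--
--     if N%3 == 0 and N==3:
--         return min(price)
--     elif N>3:
--         for i in range(N//3):
--             price_1 = price[:3]
--             price = price[3:]
--             discount += min(price_1)
--
--     return discount
-- ===== SOURCE B (Python) =====
-- def MaximumDiscount(N, price):
--     price.sort(reverse=True)
--     return sum(price[i] for i in range(2, 3 * (N // 3), 3))
-- ===== Notes on version B (the rewrite author's own statement) =====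
-- stated objective: faster
-- what changed: B sorts once and sums the entries at indices 2,5,8,... of the sorted list directly, replacing A's loop that repeatedly copies the list with two slices and takes min of each 3-element prefix.
-- intended difference: On inputs with N = 3 and a price list of more than 3 entries in which some price has three strictly larger prices, A returns the minimum of the whole list while B returns the third-highest price (the minimum of the top group of three), which is the intended discount for a group of three. — e.g. on MaximumDiscount(3, [4, 3, 2, 1]): A returns 1, B returns 2
-- outside the precondition, e.g. on MaximumDiscount(3, [7]): A returns 7, B raises IndexError; on MaximumDiscount(6, [5, 4, 3, 2]): A returns 5, B raises IndexError
import Mathlib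
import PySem

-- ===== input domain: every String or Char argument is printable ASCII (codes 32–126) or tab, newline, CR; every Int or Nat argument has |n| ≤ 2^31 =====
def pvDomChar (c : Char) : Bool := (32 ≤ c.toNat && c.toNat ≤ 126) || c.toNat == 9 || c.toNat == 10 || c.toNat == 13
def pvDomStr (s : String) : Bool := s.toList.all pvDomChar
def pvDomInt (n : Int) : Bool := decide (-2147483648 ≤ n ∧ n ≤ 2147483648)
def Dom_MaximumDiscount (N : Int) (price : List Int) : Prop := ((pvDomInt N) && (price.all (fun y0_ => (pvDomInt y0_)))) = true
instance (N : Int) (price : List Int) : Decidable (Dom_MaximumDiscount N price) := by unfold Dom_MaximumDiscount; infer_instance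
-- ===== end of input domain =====

-- B replaces A's repeated slice-and-min peeling with one direct sum of the sorted
-- list's entries at indices 2, 5, 8, …; return-value equivalence only (both Pythons
-- sort `price` in place, the same observable mutation).

-- ===== PORT A =====
def MaximumDiscount (N : Int) (price : List Int) : Int :=
  let price := PySem.List.sorted price (fun x => x) true
  let discount : Int := 0
  if PySem.Int.mod N 3 = 0 ∧ N = 3 then
    -- min(price): raises ValueError on []; that input is outside Pre_
    (PySem.List.min? price (fun x => x)).getD 0
  else if N > 3 then
    ((PySem.List.pyRange 0 (PySem.Int.floordiv N 3) 1).foldl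
      (fun (st : List Int × Int) _ =>
        let price_1 := PySem.List.slice st.1 none (some 3)
        let price := PySem.List.slice st.1 (some 3) none
        -- min(price_1): raises ValueError when the slice is empty; outside Pre_
        (price, st.2 + (PySem.List.min? price_1 (fun x => x)).getD 0))
      (price, discount)).2
  else discount

-- ===== PORT B =====
def MaximumDiscount_alt (N : Int) (price : List Int) : Int :=
  let s := PySem.List.sorted price (fun x => x) true
  -- price[i]: raises IndexError out of range; outside Pre_
  (PySem.List.pyRange 2 (3 * PySem.Int.floordiv N 3) 3).foldl
    (fun acc i => acc + (PySem.List.pyGet? s i).getD 0) 0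

-- ===== PRECONDITION & SPEC =====
-- Pre_ excludes inputs whose price list is shorter than 3*(N//3) (N larger than the
-- list warrants): there A either raises ValueError (min of an empty slice / empty list)
-- or sums a partial last group, and B's direct indexing raises IndexError.
def Pre_MaximumDiscount (N : Int) (price : List Int) : Prop :=
  3 * PySem.Int.floordiv N 3 ≤ (price.length : Int)
instance (N : Int) (price : List Int) : Decidable (Pre_MaximumDiscount N price) := by
  unfold Pre_MaximumDiscount; infer_instance
def pvWitness_MaximumDiscount : Int × List Int := (6, [5, 4, 3, 2, 1, 0])

-- On inputs with N = 3 and more than 3 prices of which some price is strictly below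
-- three others, A returns the minimum of the WHOLE list while B returns the third-highest
-- price (the minimum of the top group of 3), which is the intended discount for a group
-- of three purchases.
def D_MaximumDiscount (N : Int) (price : List Int) : Prop :=
  N = 3 ∧ 3 < price.length ∧ ∃ x ∈ price, 3 ≤ price.countP (fun y => decide (x < y))
instance (N : Int) (price : List Int) : Decidable (D_MaximumDiscount N price) := by
  unfold D_MaximumDiscount; infer_instance

def Spec_MaximumDiscount (N : Int) (price : List Int) (out : Int) : Prop :=
  ¬ D_MaximumDiscount N price → out = MaximumDiscount_alt N price
instance (N : Int) (price : List Int) (out : Int) : Decidable (Spec_MaximumDiscount N price out) := by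
  unfold Spec_MaximumDiscount; infer_instance

def pvDiffWitness_MaximumDiscount : Int × List Int := (3, [4, 3, 2, 1])
def pvDiffWitnessOut_MaximumDiscount : Int × Int := (1, 2)

-- ===== CLAIM (what is proved, stated in full; the proofs are below) =====
def Claim_unchanged_MaximumDiscount : Prop := ∀ (N : Int) (price : List Int), Dom_MaximumDiscount N price → Pre_MaximumDiscount N price → Spec_MaximumDiscount N price (MaximumDiscount N price)
def Claim_exact_MaximumDiscount : Prop := ∀ (N : Int) (price : List Int), Dom_MaximumDiscount N price → Pre_MaximumDiscount N price → D_MaximumDiscount N price → MaximumDiscount N price ≠ MaximumDiscount_alt N price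
def Claim_changed_MaximumDiscount : Prop := Dom_MaximumDiscount (pvDiffWitness_MaximumDiscount.1) (pvDiffWitness_MaximumDiscount.2) ∧ Pre_MaximumDiscount (pvDiffWitness_MaximumDiscount.1) (pvDiffWitness_MaximumDiscount.2) ∧ D_MaximumDiscount (pvDiffWitness_MaximumDiscount.1) (pvDiffWitness_MaximumDiscount.2) ∧ MaximumDiscount (pvDiffWitness_MaximumDiscount.1) (pvDiffWitness_MaximumDiscount.2) = pvDiffWitnessOut_MaximumDiscount.1 ∧ MaximumDiscount_alt (pvDiffWitness_MaximumDiscount.1) (pvDiffWitness_MaximumDiscount.2) = pvDiffWitnessOut_MaximumDiscount.2 ∧ pvDiffWitnessOut_MaximumDiscount.1 ≠ pvDiffWitnessOut_MaximumDiscount.2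

-- ===== LEMMAS AND PROOFS =====

-- the common shape both loops compute: for k groups, the third entry of each
-- successive block of 3
def pvBsum : Nat → List Int → Int
  | 0, _ => 0
  | k + 1, t => (t[2]?).getD 0 + pvBsum k (t.drop 3)

-- A's loop, one step per item of the range (the item itself is ignored)
lemma pvA_loop (l : List Int) (t : List Int) (d : Int)
    (hs : t.Pairwise (fun a b => b ≤ a)) (hl : 3 * l.length ≤ t.length) :
    (l.foldl
      (fun (st : List Int × Int) _ =>
        (PySem.List.slice st.1 (some 3) none,
          st.2 + (PySem.List.min? (PySem.List.slice st.1 none (some 3)) (fun x => x)).getD 0))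
      (t, d)).2 = d + pvBsum l.length t := by
  induction l generalizing t d with
  | nil => simp [pvBsum]
  | cons x l ih =>
    obtain ⟨a, b, c, r, rfl⟩ : ∃ a b c r, t = a :: b :: c :: r := by
      match t, hl with
      | a :: b :: c :: r, _ => exact ⟨a, b, c, r, rfl⟩
    have hcb : c ≤ b := by simp at hs; omega
    have hba : b ≤ a := by simp at hs; omega
    simp only [List.foldl_cons]
    have hdrop : PySem.List.slice (a :: b :: c :: r) (some 3) none = r := by
      rw [PySem.List.slice_from _ (by norm_num)]; rfl
    have htake : PySem.List.slice (a :: b :: c :: r) none (some 3) = [a, b, c] := by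
      rw [PySem.List.slice_to _ (by norm_num)]; rfl
    rw [hdrop, htake, PySem.List.min?_id_cons]
    have hr : r.Pairwise (fun a b => b ≤ a) := by
      simp at hs; exact hs.2.2.2
    rw [ih r _ hr (by simp at hl ⊢; omega)]
    simp [pvBsum, List.foldl, min_def]
    split_ifs <;> omega

-- B's sum of t[3j+2] over j < k equals the same block recursion
lemma pvB_sum (k : Nat) (t : List Int) :
    ((List.range k).map (fun j => ((t[3 * j + 2]?).getD 0 : Int))).sum = pvBsum k t := by
  induction k generalizing t with
  | zero => simp [pvBsum]
  | succ k ih =>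
    rw [List.range_succ_eq_map]
    simp only [List.map_cons, List.map_map, List.sum_cons]
    have : ((List.range k).map ((fun j => ((t[3 * j + 2]?).getD 0 : Int)) ∘ (fun i => i + 1))).sum
        = ((List.range k).map (fun j => (((t.drop 3)[3 * j + 2]?).getD 0 : Int))).sum := by
      congr 1
      apply List.map_congr_left
      intro j _
      simp [List.getElem?_drop]
      ring_nf
    rw [this, ih]
    simp [pvBsum]

-- B's fold written as that sum
lemma pvB_eq (k : Nat) (s : List Int) (h2 : 2 < 3 * (k : Int) ∨ k = 0) :
    (PySem.List.pyRange 2 (3 * (k : Int)) 3).foldl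
      (fun acc i => acc + (PySem.List.pyGet? s i).getD 0) 0 = pvBsum k s := by
  rcases h2 with h2 | rfl
  · rw [PySem.List.pyRange_of_pos 2 (3 * (k : Int)) (by norm_num), if_pos h2]
    have hk : ((3 * (k : Int) - 2 + 3 - 1) / 3).toNat = k := by omega
    rw [hk, PySem.List.foldl_add]
    simp only [List.map_map, zero_add]
    rw [← pvB_sum k s]
    congr 1
    apply List.map_congr_left
    intro j _
    simp only [Function.comp_apply]
    rw [show (2 : Int) + 3 * (j : Int) = ((3 * j + 2 : Nat) : Int) from by push_cast; ring,
      PySem.List.pyGet?_natCast]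
  · have : PySem.List.pyRange 2 (3 * ((0 : Nat) : Int)) 3 = [] := by decide
    rw [this]; simp [pvBsum]

-- a descending-sorted list of length ≥ 3*k never reads past the end in pvBsum;
-- combined statement used for the N = 3 case: pvBsum 1 of a 3-element descending list
lemma pvmin_eq_third (a b c : Int) (r : List Int)
    (hs : (a :: b :: c :: r).Pairwise (fun x y => y ≤ x)) (hr : r = []) :
    (PySem.List.min? (a :: b :: c :: r) (fun x => x)).getD 0 = c := by
  subst hr
  rw [PySem.List.min?_id_cons]
  simp at hs
  simp [List.foldl, min_def]
  split_ifs <;> omega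

-- ===== VERDICT (by name: the statement is the Claim_ definition above) =====
-- the heart of the N = 3 case: in a descending list a::b::c::r, the overall minimum
-- equals c exactly when no element of the list has three strictly larger elements
lemma pv_min_eq_third_iff (a b c : Int) (r : List Int)
    (hsp : (a :: b :: c :: r).Pairwise (fun x y => y ≤ x)) :
    List.foldl min a (b :: c :: r) = c ↔
      (a :: b :: c :: r).countP
        (fun y => decide (List.foldl min a (b :: c :: r) < y)) ≤ 2 := by
  have hfl := PySem.List.foldl_min_le (b :: c :: r) a
  set m := List.foldl min a (b :: c :: r) with hm
  have hcb : c ≤ b := by simp [List.pairwise_cons] at hsp; omega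
  have hba : b ≤ a := by simp [List.pairwise_cons] at hsp; omega
  have hrc : ∀ y ∈ r, y ≤ c := by
    simp [List.pairwise_cons] at hsp; exact fun y hy => hsp.2.2.1 y hy
  have hmc : m ≤ c := hfl.2 c (by simp)
  constructor
  · intro hmeq
    have hr0 : r.countP (fun y => decide (m < y)) = 0 :=
      List.countP_eq_zero.mpr (fun y hy => by
        have := hrc y hy; simp; omega)
    simp [List.countP_cons, hr0]
    split_ifs <;> omega
  · intro hcount
    by_contra hne
    have hlt : m < c := lt_of_le_of_ne hmc hne
    have hltb : m < b := lt_of_lt_of_le hlt hcb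
    have hlta : m < a := lt_of_lt_of_le hltb hba
    simp [hlt, hltb, hlta] at hcount

-- arithmetic facts about N//3 used by the case split
lemma pv_fd_pos (N : Int) (h : 3 < N) : 1 ≤ PySem.Int.floordiv N 3 := by
  rw [PySem.Int.le_floordiv_iff_mul_le (by norm_num)]; omega

lemma pv_fd_nonpos (N : Int) (h : N < 3) : PySem.Int.floordiv N 3 ≤ 0 := by
  have := (PySem.Int.floordiv_lt_iff_lt_mul (a := N) (b := 3) (q := 1) (by norm_num)).mpr (by omega)
  omega

theorem MaximumDiscount_spec : Claim_unchanged_MaximumDiscount := by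
  intro N price _ hpre
  unfold Spec_MaximumDiscount
  intro hnd
  unfold Pre_MaximumDiscount at hpre
  unfold D_MaximumDiscount at hnd
  unfold MaximumDiscount MaximumDiscount_alt
  simp only []
  set s := PySem.List.sorted price (fun x => x) true with hsdef
  have hslen : s.length = price.length := PySem.List.length_sorted price (fun x => x) true
  have hsp : s.Pairwise (fun a b => b ≤ a) := PySem.List.sorted_pairwise_rev price (fun x => x)
  by_cases h3 : N = 3
  · -- N = 3: ¬D_ forces exactly three prices
    subst h3
    have hfd : PySem.Int.floordiv 3 3 = 1 := by decide
    rw [if_pos ⟨by decide, rfl⟩]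
    have hk : (3 : Int) * PySem.Int.floordiv 3 3 = 3 * ((1 : Nat) : Int) := by rw [hfd]; rfl
    rw [hk, pvB_eq 1 s (Or.inl (by norm_num))]
    have hlen : 3 ≤ s.length := by rw [hfd] at hpre; omega
    obtain ⟨a, b, c, r, hs3⟩ : ∃ a b c r, s = a :: b :: c :: r := by
      match s, hlen with
      | a :: b :: c :: r, _ => exact ⟨a, b, c, r, rfl⟩
    rw [hs3] at hsp ⊢
    have hB : pvBsum 1 (a :: b :: c :: r) = c := by simp [pvBsum]
    rw [hB, PySem.List.min?_id_cons, Option.getD_some]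
    by_cases hcond : ∃ x ∈ price, 3 ≤ price.countP (fun y => decide (x < y))
    · -- some price is below three others: ¬D_ then forces exactly three prices
      have hl3 : price.length ≤ 3 := by
        by_contra hgt
        exact hnd ⟨rfl, by omega, hcond⟩
      have hr' : r = [] := by
        have hs3' : s.length = 3 := by omega
        rw [hs3] at hs3'
        simpa using List.eq_nil_of_length_eq_zero (by simpa using hs3')
      subst hr'
      have := pvmin_eq_third a b c [] hsp rfl
      rw [PySem.List.min?_id_cons, Option.getD_some] at this
      exact this
    · push Not at hcond
      have hmem : List.foldl min a (b :: c :: r) ∈ price := by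
        have hm' : List.foldl min a (b :: c :: r) ∈ a :: b :: c :: r := by
          rcases PySem.List.foldl_min_mem (b :: c :: r) a with h | h
          · rw [h]; simp
          · exact List.mem_cons_of_mem a h
        rw [← hs3] at hm'
        exact (PySem.List.mem_sorted price (fun x => x) true _).mp hm'
      have hcnt := hcond _ hmem
      have hperm : (PySem.List.sorted price (fun x => x) true).Perm price :=
        PySem.List.sorted_perm price (fun x => x) true
      rw [← hsdef, hs3] at hperm
      refine (pv_min_eq_third_iff a b c r hsp).mpr ?_
      have h1 := hperm.countP_eq (fun y => decide (List.foldl min a (b :: c :: r) < y))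
      omega
  · by_cases h4 : 3 < N
    · rw [if_neg (by rintro ⟨-, h⟩; exact h3 h), if_pos h4]
      have hm1 : 1 ≤ PySem.Int.floordiv N 3 := pv_fd_pos N h4
      set m := PySem.Int.floordiv N 3 with hmdef
      set k := m.toNat with hkdef
      have hmk : (k : Int) = m := Int.toNat_of_nonneg (by omega)
      have hlenr : (PySem.List.pyRange 0 m 1).length = k := by
        rw [PySem.List.length_pyRange_one]; omega
      have hk3 : 3 * k ≤ s.length := by rw [hslen]; omega
      rw [pvA_loop (PySem.List.pyRange 0 m 1) s 0 hsp (by rw [hlenr]; exact hk3)]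
      rw [hlenr, zero_add]
      rw [show (3 : Int) * m = 3 * (k : Int) by rw [hmk], pvB_eq k s (Or.inl (by omega))]
    · -- N < 3, N ≠ 3: both sides are 0
      rw [if_neg (by rintro ⟨-, h⟩; exact h3 h), if_neg h4]
      have hfd : PySem.Int.floordiv N 3 ≤ 0 := pv_fd_nonpos N (by omega)
      rw [PySem.List.pyRange_of_pos 2 (3 * PySem.Int.floordiv N 3) (by norm_num),
        if_neg (by omega)]
      simp

theorem MaximumDiscount_changed : Claim_changed_MaximumDiscount := by
  unfold Claim_changed_MaximumDiscount; decide

theorem MaximumDiscount_tight : Claim_exact_MaximumDiscount := by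
  intro N price _ hpre hd
  obtain ⟨h3, hgt, x, hx, hcnt⟩ := hd
  unfold MaximumDiscount MaximumDiscount_alt
  simp only []
  subst h3
  set s := PySem.List.sorted price (fun x => x) true with hsdef
  have hslen : s.length = price.length := PySem.List.length_sorted price (fun x => x) true
  have hsp : s.Pairwise (fun a b => b ≤ a) := PySem.List.sorted_pairwise_rev price (fun x => x)
  have hfd : PySem.Int.floordiv 3 3 = 1 := by decide
  rw [if_pos ⟨show PySem.Int.mod 3 3 = 0 from by decide, rfl⟩]
  have hk : (3 : Int) * PySem.Int.floordiv 3 3 = 3 * ((1 : Nat) : Int) := by rw [hfd]; rfl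
  rw [hk, pvB_eq 1 s (Or.inl (by norm_num))]
  have hlen : 3 ≤ s.length := by rw [hslen]; omega
  obtain ⟨a, b, c, r, hs3⟩ : ∃ a b c r, s = a :: b :: c :: r := by
    match s, hlen with
    | a :: b :: c :: r, _ => exact ⟨a, b, c, r, rfl⟩
  rw [hs3] at hsp ⊢
  have hB : pvBsum 1 (a :: b :: c :: r) = c := by simp [pvBsum]
  rw [hB, PySem.List.min?_id_cons, Option.getD_some]
  intro heq
  have hperm : (PySem.List.sorted price (fun x => x) true).Perm price :=
    PySem.List.sorted_perm price (fun x => x) true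
  rw [← hsdef, hs3] at hperm
  have hcount := (pv_min_eq_third_iff a b c r hsp).mp heq
  -- the minimum is ≤ x, so x's three strictly larger elements are also above the minimum
  have hxs : x ∈ a :: b :: c :: r := by
    rw [← hs3]; exact (PySem.List.mem_sorted price (fun x => x) true _).mpr hx
  have hfl := PySem.List.foldl_min_le (b :: c :: r) a
  have hmx : List.foldl min a (b :: c :: r) ≤ x := by
    rcases List.mem_cons.mp hxs with h | h
    · exact h ▸ hfl.1
    · exact hfl.2 x h
  have hmono : price.countP (fun y => decide (x < y)) ≤
      price.countP (fun y => decide (List.foldl min a (b :: c :: r) < y)) :=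
    List.countP_mono_left (fun y _ hy => by
      simp only [decide_eq_true_eq] at hy ⊢; omega)
  have h1 := hperm.countP_eq (fun y => decide (List.foldl min a (b :: c :: r) < y))
  omega
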